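-- pv_equiv track=rewrite | github.com/LCEMocha/Algorithm | 프로그래머스/3/42895. N으로 표현/N으로 표현.py | solution
-- ===== SOURCE A (Python) =====
-- def solution(N, number):
--     if N == number:
--         return 1
--
--     # 1부터 8까지의 사용 횟수로 만들 수 있는 숫자들의 집합을 저장할 리스트
--     # dp[i]는 N을 i+1번 사용해서 만들 수 있는 숫자들의 집합
--     dp = [set() for _ in range(8)]
--
--     for i in range(8):
--         # N, NN, NNN, ... 을 미리 추가
--         dp[i].add(int(str(N) * (i + 1)))
--
--         for j in range(i):
--             for op1 in dp[j]:
--                 for op2 in dp[i-j-1]: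
--                     dp[i].add(op1 + op2) # 더하기
--                     dp[i].add(op1 - op2) # 빼기
--                     dp[i].add(op1 * op2) # 곱하기
--                     if op2 != 0:
--                         dp[i].add(op1 // op2) # 나누기
--
--         # 원하는 숫자가 만들어진 경우
--         if number in dp[i]:
--             return i + 1
--
--     return -1
-- ===== SOURCE B (Python) =====
-- def solution(N, number):
--     if N == number:
--         return 1
--
--     memo = {}
--
--     def reachable(count):
--         # set of integers expressible with exactly `count` copies of N
--         if count in memo:
--             return memo[count]
--         result = {int(str(N) * count)}
--         for s in range(1, count):
--             for op1 in reachable(s):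
--                 for op2 in reachable(count - s):
--                     result.add(op1 + op2)
--                     result.add(op1 - op2)
--                     result.add(op1 * op2)
--                     if op2 != 0:
--                         result.add(op1 // op2)
--         memo[count] = result
--         return result
--
--     for count in range(1, 9):
--         if number in reachable(count):
--             return count
--     return -1
-- ===== Notes on version B (the rewrite author's own statement) =====
-- stated objective: alternative
-- what changed: Replaced the bottom-up 8-slot dp table with a top-down memoized recursion reachable(count) over a dict, combining splits s/(count-s) recursively instead of filling dp[i] from earlier table rows.
import Mathlib
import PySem

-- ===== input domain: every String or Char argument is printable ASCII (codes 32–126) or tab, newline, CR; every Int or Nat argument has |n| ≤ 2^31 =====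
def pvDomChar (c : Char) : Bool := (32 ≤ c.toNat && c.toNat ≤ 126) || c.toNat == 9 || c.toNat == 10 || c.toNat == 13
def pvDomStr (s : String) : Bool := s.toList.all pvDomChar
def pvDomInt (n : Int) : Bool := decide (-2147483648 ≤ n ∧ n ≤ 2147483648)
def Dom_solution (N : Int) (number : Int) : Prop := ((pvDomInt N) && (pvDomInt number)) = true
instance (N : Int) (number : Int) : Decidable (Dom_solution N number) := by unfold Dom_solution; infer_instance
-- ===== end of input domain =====

-- B replaces A's bottom-up 8-slot dp table with a top-down memoized recursion reachable(count)
-- over a dict of levels (objective: alternative decomposition, same cost).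


-- ===== PORT A =====
-- int(str(N) * k); the `.getD 0` is unreachable under Pre_solution (for 0 ≤ N the parse
-- always succeeds; the ValueError inputs N < 0 ∧ N ≠ number are excluded by Pre_solution)
def repA (N : Int) (k : Nat) : Int :=
  (PySem.Int.ofChars? (PySem.List.pyRepeat (PySem.Int.toChars N) (k : Int))).getD 0

-- the four dp[i].add(...) statements of the innermost loop body
def addOpsA (st : Std.HashSet Int) (op1 op2 : Int) : Std.HashSet Int :=
  let st := st.insert (op1 + op2)
  let st := st.insert (op1 - op2)
  let st := st.insert (op1 * op2)
  if op2 ≠ 0 then st.insert (PySem.Int.floordiv op1 op2) else st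

-- body of iteration i: dp[i] starts empty, gets the repunit, then the triple loop over j/op1/op2
def levelA (dp : List (Std.HashSet Int)) (N : Int) (i : Nat) : Std.HashSet Int :=
  (List.range i).foldl
    (fun st j =>
      (dp.getD j (∅ : Std.HashSet Int)).fold
        (fun st op1 =>
          (dp.getD (i - j - 1) (∅ : Std.HashSet Int)).fold
            (fun st op2 => addOpsA st op1 op2) st) st)
    ((∅ : Std.HashSet Int).insert (repA N (i + 1)))

-- 'for i in range(8)' with the early 'return i + 1'; dp holds the completed levels 0..i-1
-- (the remaining slots of A's pre-allocated list are still empty sets and never read)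
def loopA (N number : Int) (dp : List (Std.HashSet Int)) (i : Nat) : Int :=
  if i < 8 then
    let lv := levelA dp N i
    if lv.contains number then (i : Int) + 1
    else loopA N number (dp ++ [lv]) (i + 1)
  else -1
termination_by 8 - i

def solution (N : Int) (number : Int) : Int :=
  if N = number then 1 else loopA N number [] 0

-- ===== PORT B =====
def repB (N : Int) (k : Nat) : Int :=
  (PySem.Int.ofChars? (PySem.List.pyRepeat (PySem.Int.toChars N) (k : Int))).getD 0

def addOpsB (st : Std.HashSet Int) (op1 op2 : Int) : Std.HashSet Int :=
  let st := st.insert (op1 + op2)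
  let st := st.insert (op1 - op2)
  let st := st.insert (op1 * op2)
  if op2 ≠ 0 then st.insert (PySem.Int.floordiv op1 op2) else st

mutual
-- reachable(count): memo hit, else build from the repunit and the splits s / count - s
def reachB (N : Int) (count : Nat) (memo : PySem.Dict Nat (Std.HashSet Int)) :
    Std.HashSet Int × PySem.Dict Nat (Std.HashSet Int) :=
  match memo.get? count with
  | some r => (r, memo)
  | none =>
    let p := reachLoopB N count 1 (Std.HashSet.ofList [repB N count]) memo
    (p.1, p.2.insert count p.1)
termination_by (count, 1, 0)

-- 'for s in range(1, count)' threading result and memo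
def reachLoopB (N : Int) (count s : Nat) (result : Std.HashSet Int)
    (memo : PySem.Dict Nat (Std.HashSet Int)) :
    Std.HashSet Int × PySem.Dict Nat (Std.HashSet Int) :=
  if h : 1 ≤ s ∧ s < count then
    let p1 := reachB N s memo
    let p2 := reachB N (count - s) p1.2
    let result := p1.1.fold
      (fun res op1 => p2.1.fold (fun res op2 => addOpsB res op1 op2) res) result
    reachLoopB N count (s + 1) result p2.2
  else (result, memo)
termination_by (count, 0, count - s)
decreasing_by
  · exact Prod.Lex.left _ _ (by omega)
  · exact Prod.Lex.left _ _ (by omega)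
  · exact Prod.Lex.right _ (Prod.Lex.right _ (by omega))
end

-- 'for count in range(1, 9)'
def loopB (N number : Int) (memo : PySem.Dict Nat (Std.HashSet Int)) (count : Nat) : Int :=
  if count < 9 then
    let p := reachB N count memo
    if p.1.contains number then (count : Int)
    else loopB N number p.2 (count + 1)
  else -1
termination_by 9 - count

def solution_alt (N : Int) (number : Int) : Int :=
  if N = number then 1 else loopB N number PySem.Dict.empty 1

-- ===== PRECONDITION & SPEC =====
-- Pre_ excludes N < 0 with N ≠ number: there Python A (and B) raise ValueError at
-- int(str(N) * k) for k ≥ 2 ('-5-5' is not an int literal); A returns on all other inputs.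
def Pre_solution (N : Int) (number : Int) : Prop := 0 ≤ N ∨ N = number
instance (N : Int) (number : Int) : Decidable (Pre_solution N number) := by
  unfold Pre_solution; infer_instance

def pvWitness_solution : Int × Int := (5, 12)

def Spec_solution (N : Int) (number : Int) (out : Int) : Prop := out = solution_alt N number
instance (N : Int) (number : Int) (out : Int) : Decidable (Spec_solution N number out) := by
  unfold Spec_solution; infer_instance

-- ===== CLAIM (what is proved, stated in full; the proofs are below) =====
def Claim_equal_solution : Prop := ∀ (N : Int) (number : Int), Dom_solution N number →
  Pre_solution N number → Spec_solution N number (solution N number)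

-- ===== LEMMAS AND PROOFS =====

theorem rep_eq : repB = repA := rfl

-- the list of completed levels after i iterations of A's outer loop
def dps (N : Int) : Nat → List (Std.HashSet Int)
  | 0 => []
  | i + 1 => dps N i ++ [levelA (dps N i) N i]

-- the set of values expressible with exactly c copies of N (c ≥ 1), as A computes it
def lvl (N : Int) (c : Nat) : Std.HashSet Int := levelA (dps N (c - 1)) N (c - 1)

-- the memo dict after levels 1..c have been computed
def memoUpTo (N : Int) : Nat → PySem.Dict Nat (Std.HashSet Int)
  | 0 => PySem.Dict.empty
  | c + 1 => (memoUpTo N c).insert (c + 1) (lvl N (c + 1))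

theorem length_dps (N : Int) (i : Nat) : (dps N i).length = i := by
  induction i with
  | zero => rfl
  | succ i ih => simp [dps, ih]

theorem getD_dps (N : Int) {j m : Nat} (h : j < m) :
    (dps N m).getD j ∅ = lvl N (j + 1) := by
  induction m with
  | zero => omega
  | succ m ih =>
    rcases Nat.lt_or_ge j m with hj | hj
    · rw [dps, List.getD, List.getElem?_append_left (by rw [length_dps]; omega)]
      exact ih hj
    · have hjm : j = m := by omega
      subst hjm
      rw [dps, List.getD, List.getElem?_append_right (by rw [length_dps]),
        length_dps]
      simp [lvl]

theorem get?_memoUpTo (N : Int) (c k : Nat) :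
    (memoUpTo N c).get? k = if 1 ≤ k ∧ k ≤ c then some (lvl N k) else none := by
  induction c with
  | zero =>
    rw [memoUpTo, PySem.Dict.get?_empty, if_neg (by omega)]
  | succ c ih =>
    rw [memoUpTo, PySem.Dict.get?_insert, ih]
    split_ifs with h1 h2 h3 <;> first | rfl | omega | (subst h1; rfl)

theorem reachB_hit (N : Int) {c k : Nat} (h1 : 1 ≤ k) (h2 : k ≤ c) :
    reachB N k (memoUpTo N c) = (lvl N k, memoUpTo N c) := by
  rw [reachB, get?_memoUpTo, if_pos ⟨h1, h2⟩]

theorem reachLoopB_fold (N : Int) (c : Nat) (hc : 1 ≤ c) :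
    ∀ (n s : Nat) (res : Std.HashSet Int), 1 ≤ s → s + n = c →
    reachLoopB N c s res (memoUpTo N (c - 1)) =
      ((List.range' (s - 1) n).foldl
        (fun st j =>
          ((dps N (c - 1)).getD j (∅ : Std.HashSet Int)).fold
            (fun st op1 =>
              ((dps N (c - 1)).getD (c - 1 - j - 1) (∅ : Std.HashSet Int)).fold
                (fun st op2 => addOpsA st op1 op2) st) st)
        res,
       memoUpTo N (c - 1)) := by
  intro n
  induction n with
  | zero =>
    intro s res hs hsn
    rw [reachLoopB, dif_neg (by omega)]
    rfl
  | succ n ih =>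
    intro s res hs hsn
    rw [reachLoopB, dif_pos ⟨hs, by omega⟩]
    simp only
    rw [reachB_hit N (c := c - 1) (k := s) hs (by omega),
      reachB_hit N (c := c - 1) (k := c - s) (by omega) (by omega)]
    simp only
    rw [ih (s + 1) _ (by omega) (by omega)]
    have e1 : s + 1 - 1 = s := by omega
    rw [e1]
    have hhead : List.range' (s - 1) (n + 1) = (s - 1) :: List.range' s n := by
      rw [List.range'_succ, Nat.sub_add_cancel hs]
    rw [hhead]
    simp only [List.foldl_cons]
    rw [getD_dps N (j := s - 1) (by omega), getD_dps N (j := c - 1 - (s - 1) - 1) (by omega)]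
    have h1 : s - 1 + 1 = s := by omega
    have h2 : c - 1 - (s - 1) - 1 + 1 = c - s := by omega
    rw [h1, h2]
    rfl

theorem reachB_fresh (N : Int) (c : Nat) (hc : 1 ≤ c) :
    reachB N c (memoUpTo N (c - 1)) = (lvl N c, memoUpTo N c) := by
  rw [reachB, get?_memoUpTo, if_neg (by omega)]
  simp only
  rw [reachLoopB_fold N c hc (c - 1) 1 _ (by omega) (by omega)]
  have hbase : Std.HashSet.ofList [repB N c] =
      (∅ : Std.HashSet Int).insert (repA N (c - 1 + 1)) := by
    rw [rep_eq]
    have : c - 1 + 1 = c := by omega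
    rw [this]
    rfl
  have hlvl : ((List.range' 0 (c - 1)).foldl
      (fun st j =>
        ((dps N (c - 1)).getD j (∅ : Std.HashSet Int)).fold
          (fun st op1 =>
            ((dps N (c - 1)).getD (c - 1 - j - 1) (∅ : Std.HashSet Int)).fold
              (fun st op2 => addOpsA st op1 op2) st) st)
      (Std.HashSet.ofList [repB N c])) = lvl N c := by
    rw [hbase, lvl, levelA, List.range_eq_range']
  rw [hlvl]
  have hmemo : (memoUpTo N (c - 1)).insert c (lvl N c) = memoUpTo N c := by
    obtain ⟨m, rfl⟩ : ∃ m, c = m + 1 := ⟨c - 1, by omega⟩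
    rfl
  rw [hmemo]

theorem loop_eq (N number : Int) : ∀ (k i : Nat), i + k = 8 →
    loopA N number (dps N i) i = loopB N number (memoUpTo N i) (i + 1) := by
  intro k
  induction k with
  | zero =>
    intro i hi
    have h8 : i = 8 := by omega
    subst h8
    rw [loopA, if_neg (by omega), loopB, if_neg (by omega)]
  | succ k ih =>
    intro i hi
    have hfresh := reachB_fresh N (i + 1) (by omega)
    simp only [Nat.add_sub_cancel] at hfresh
    rw [loopA, if_pos (show i < 8 by omega), loopB, if_pos (show i + 1 < 9 by omega)]
    rw [hfresh]
    simp only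
    have hlv : levelA (dps N i) N i = lvl N (i + 1) := rfl
    rw [hlv]
    by_cases hmem : (lvl N (i + 1)).contains number = true
    · rw [if_pos hmem, if_pos hmem]
      push_cast; ring
    · rw [if_neg hmem, if_neg hmem]
      have h2 := ih (i + 1) (by omega)
      rw [dps] at h2
      exact h2

-- ===== VERDICT (by name: the statement is the Claim_ definition above) =====
theorem solution_spec : Claim_equal_solution := by
  intro N number _ _
  unfold Spec_solution solution solution_alt
  split
  · rfl
  · exact loop_eq N number 8 0 rfl
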